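-- pv_equiv track=rewrite | github.com/Carolina-Pinheiro/TrainingProgramExercises | web3ERC1155/airdrop.py | getOwners
-- ===== SOURCE A (Python) =====
-- def getOwners(dataDictionary):
--     owners = {} # key is address, value is number of NFT owned
--     tokenID = 0
--     # Get last owner of the nftKeyID
--     for keyNFTid in dataDictionary.keys():
--         listTransactionsNFT = dataDictionary[keyNFTid]
--
--         # Append last owner based on the block number
--         #TODO: check for the block number
--         key = listTransactionsNFT[list(listTransactionsNFT.keys())[-1]][-1]
--
--         # Check is it is a previous owner or not
--         if key not in owners:
--             owners[key] = [tokenID]  # new owner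
--             tokenID += 1
--         else:
--             owners[key].append(tokenID)
--             tokenID += 1
--
--     return owners
-- ===== SOURCE B (Python) =====
-- def getOwners(dataDictionary):
--     # Token IDs are just the positions 0..n-1: extract each NFT's last owner.
--     lastOwners = [list(tx.values())[-1][-1] for tx in dataDictionary.values()]
--     # Build the result owner by owner: for every distinct owner (first-appearance
--     # order, matching dict insertion order) rescan and collect its token IDs.
--     return {owner: [i for i, o in enumerate(lastOwners) if o == owner]
--             for owner in dict.fromkeys(lastOwners)}
-- ===== Notes on version B (the rewrite author's own statement) =====
-- stated objective: alternative
-- what changed: Instead of A's single stateful loop (manual tokenID counter, last-key lookup, new-vs-known-owner branching on a growing dict), B extracts the last-owner list, then builds the result owner-by-owner: a dict comprehension over the distinct owners where each owner's token-ID list is collected by a fresh enumerate rescan.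
import Mathlib
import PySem

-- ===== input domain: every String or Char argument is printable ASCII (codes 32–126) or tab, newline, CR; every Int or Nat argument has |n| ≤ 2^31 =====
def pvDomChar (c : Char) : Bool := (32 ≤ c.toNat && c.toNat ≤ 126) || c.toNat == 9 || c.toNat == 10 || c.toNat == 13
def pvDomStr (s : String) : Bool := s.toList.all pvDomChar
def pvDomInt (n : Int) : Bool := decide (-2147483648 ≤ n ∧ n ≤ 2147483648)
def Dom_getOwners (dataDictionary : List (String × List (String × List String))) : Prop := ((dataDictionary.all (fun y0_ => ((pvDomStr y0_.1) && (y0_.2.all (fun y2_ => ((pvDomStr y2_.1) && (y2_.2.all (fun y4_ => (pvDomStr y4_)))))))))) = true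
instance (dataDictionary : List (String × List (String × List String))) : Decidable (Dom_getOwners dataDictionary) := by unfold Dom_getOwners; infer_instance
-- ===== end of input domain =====

-- B replaces A's single stateful loop (tokenID counter, membership branching on a growing dict)
-- by an owner-by-owner construction: extract the last-owner list, then for each DISTINCT owner
-- rescan it collecting that owner's token IDs. Objective: alternative (nested scan, O(n·k)).

-- ===== PORT A =====
-- key = listTransactionsNFT[list(listTransactionsNFT.keys())[-1]][-1]
-- none = IndexError (empty inner dict / empty last transaction list); those inputs are excluded by Pre_,
-- so the `.getD ""` default is never reached on admitted inputs.
def getOwnersKeyA (listTransactionsNFT : List (String × List String)) : Option String :=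
  (PySem.List.pyGet? (listTransactionsNFT.map Prod.fst) (-1)).bind fun lastKey =>
    ((PySem.Dict.mk listTransactionsNFT).get? lastKey).bind fun txs =>
      PySem.List.pyGet? txs (-1)

-- the for-loop: state = (owners, tokenID), one step per key of dataDictionary
def getOwnersLoopA : List (String × List (String × List String)) → PySem.Dict String (List Int) → Int → PySem.Dict String (List Int)
  | [], owners, _ => owners
  | (_, listTransactionsNFT) :: rest, owners, tokenID =>
    let key := (getOwnersKeyA listTransactionsNFT).getD ""
    if owners.contains key then
      getOwnersLoopA rest (owners.modify key [] (· ++ [tokenID])) (tokenID + 1)   -- owners[key].append(tokenID)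
    else
      getOwnersLoopA rest (owners.insert key [tokenID]) (tokenID + 1)             -- owners[key] = [tokenID]

def getOwners (dataDictionary : List (String × List (String × List String))) : List (String × List Int) :=
  (getOwnersLoopA dataDictionary PySem.Dict.empty 0).items

-- ===== PORT B =====
-- list(tx.values())[-1][-1]; none = IndexError, excluded by Pre_ as in A's port.
def getOwnersKeyB (transactions : List (String × List String)) : Option String :=
  (PySem.List.pyGet? (transactions.map Prod.snd) (-1)).bind fun txs =>
    PySem.List.pyGet? txs (-1)

-- dict comprehension over dict.fromkeys(lastOwners): the keys are distinct (dedup), so its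
-- items list is exactly this map; each value is the inner comprehension over enumerate.
def getOwners_alt (dataDictionary : List (String × List (String × List String))) : List (String × List Int) :=
  let lastOwners := dataDictionary.map (fun p => (getOwnersKeyB p.2).getD "")
  (PySem.List.dedup lastOwners).map (fun owner =>
    (owner, (PySem.List.enumerate lastOwners 0).filterMap
      (fun q => if q.2 == owner then some q.1 else none)))

-- ===== PRECONDITION & SPEC =====
-- Pre_ excludes exactly the inputs where Python A raises IndexError (an empty inner dict, or an empty
-- last transaction list), and requires each inner association list to have distinct keys — the
-- invariant of the List-representation of a Python dict, which every actual Python input satisfies.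
def Pre_getOwners (dataDictionary : List (String × List (String × List String))) : Prop :=
  ∀ p ∈ dataDictionary,
    (p.2.map Prod.fst).Nodup ∧ p.2 ≠ [] ∧ (p.2.getLastD ("", [])).2 ≠ []
instance (dataDictionary : List (String × List (String × List String))) : Decidable (Pre_getOwners dataDictionary) := by unfold Pre_getOwners; infer_instance

def pvWitness_getOwners : (List (String × List (String × List String))) :=
  [("nft1", [("1", ["addr1", "alice"]), ("2", ["bob"])]), ("nft2", [("1", ["alice"])])]

def Spec_getOwners (dataDictionary : List (String × List (String × List String))) (out : List (String × List Int)) : Prop := out = getOwners_alt dataDictionary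
instance (dataDictionary : List (String × List (String × List String))) (out : List (String × List Int)) : Decidable (Spec_getOwners dataDictionary out) := by unfold Spec_getOwners; infer_instance

-- ===== CLAIM (what is proved, stated in full; the proofs are below) =====
def Claim_equal_getOwners : Prop := ∀ (dataDictionary : List (String × List (String × List String))), Dom_getOwners dataDictionary → Pre_getOwners dataDictionary → Spec_getOwners dataDictionary (getOwners dataDictionary)

-- ===== LEMMAS AND PROOFS =====

-- On an inner dict with distinct keys, A's "value of the last key" is B's "last value".
theorem keyA_eq_keyB (inner : List (String × List String))
    (hnd : (inner.map Prod.fst).Nodup) : getOwnersKeyA inner = getOwnersKeyB inner := by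
  unfold getOwnersKeyA getOwnersKeyB
  rcases h : inner.getLast? with _ | ⟨q⟩
  · rw [List.getLast?_eq_none_iff] at h
    subst h; rfl
  · have hmem : q ∈ inner := List.mem_of_getLast? h
    have h1 : PySem.List.pyGet? (inner.map Prod.fst) (-1) = some q.1 := by
      rw [PySem.List.pyGet?_neg_one, List.getLast?_map, h]; rfl
    have h2 : PySem.List.pyGet? (inner.map Prod.snd) (-1) = some q.2 := by
      rw [PySem.List.pyGet?_neg_one, List.getLast?_map, h]; rfl
    have h3 : (PySem.Dict.mk inner).get? q.1 = some q.2 :=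
      PySem.Dict.get?_of_mem_items (d := PySem.Dict.mk inner) hmem hnd
    rw [h1, h2, Option.bind_some, Option.bind_some, h3, Option.bind_some]

-- A's insert of a fresh key is exactly a modify step with default [].
theorem insert_eq_modify (owners : PySem.Dict String (List Int)) (key : String) (t : Int)
    (h : owners.contains key = false) :
    owners.insert key [t] = owners.modify key [] (· ++ [t]) := by
  show owners.insert key [t] = owners.insert key (owners.getD key [] ++ [t])
  rw [PySem.Dict.getD_of_not_contains _ _ h, List.nil_append]

-- A's fused loop is the grouping fold over the enumerated last-owner list (B's semantics).
theorem loopA_eq_fold (L : List (String × List (String × List String)))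
    (hL : ∀ p ∈ L, (p.2.map Prod.fst).Nodup)
    (owners : PySem.Dict String (List Int)) (t : Int) :
    getOwnersLoopA L owners t
      = (PySem.List.enumerate (L.map (fun p => (getOwnersKeyB p.2).getD "")) t).foldl
          (fun owners p => owners.modify p.2 [] (· ++ [p.1])) owners := by
  induction L generalizing owners t with
  | nil => rfl
  | cons hd rest ih =>
    have hk : (getOwnersKeyA hd.2).getD "" = (getOwnersKeyB hd.2).getD "" := by
      rw [keyA_eq_keyB hd.2 (hL hd (List.mem_cons_self))]
    rw [List.map_cons, PySem.List.enumerate_cons, List.foldl_cons]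
    show (let key := (getOwnersKeyA hd.2).getD "";
          if owners.contains key then
            getOwnersLoopA rest (owners.modify key [] (· ++ [t])) (t + 1)
          else getOwnersLoopA rest (owners.insert key [t]) (t + 1)) = _
    simp only [hk]
    split_ifs with h
    · exact ih (fun p hp => hL p (List.mem_cons_of_mem _ hp)) _ _
    · rw [insert_eq_modify owners _ t (by simpa using h)]
      exact ih (fun p hp => hL p (List.mem_cons_of_mem _ hp)) _ _

-- the inner comprehension of B, as filter-then-project over the swapped pairs
theorem filterMap_eq_filter_swap (l : List (Int × String)) (owner : String) :
    ((l.map Prod.swap).filter (fun q => q.1 == owner)).map Prod.snd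
      = l.filterMap (fun q => if q.2 == owner then some q.1 else none) := by
  induction l with
  | nil => rfl
  | cons x xs ih =>
    simp only [List.map_cons, List.filter_cons, List.filterMap_cons, Prod.swap]
    by_cases h : x.2 == owner
    · simp [h, ih]
    · simp [h, ih]

-- items of the grouping fold from empty = for each distinct owner, its collected values
theorem items_grouping_fold (lastOwners : List String) :
    ((PySem.List.enumerate lastOwners 0).foldl
        (fun owners p => owners.modify p.2 [] (· ++ [p.1])) PySem.Dict.empty).items
      = (PySem.List.dedup lastOwners).map (fun owner =>
          (owner, (PySem.List.enumerate lastOwners 0).filterMap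
            (fun q => if q.2 == owner then some q.1 else none))) := by
  set e := PySem.List.enumerate lastOwners 0 with he
  have hswap : ∀ (d : PySem.Dict String (List Int)),
      e.foldl (fun owners p => owners.modify p.2 [] (· ++ [p.1])) d
        = (e.map Prod.swap).foldl (fun owners q => owners.modify q.1 [] (· ++ [q.2])) d := by
    intro d; rw [List.foldl_map]; rfl
  rw [hswap]
  set l := e.map Prod.swap with hl
  set D := l.foldl (fun owners q => owners.modify q.1 [] (· ++ [q.2])) PySem.Dict.empty with hD
  have hnd : D.keys.Nodup := by
    rw [hD]
    exact PySem.Dict.nodup_keys_foldl_modify_key l Prod.fst [] (fun d q => (· ++ [q.2]))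
      PySem.Dict.empty (by simp)
  have hkeys : D.keys = PySem.List.dedup lastOwners := by
    rw [hD, PySem.Dict.keys_foldl_modify_key]
    have : l.map Prod.fst = lastOwners := by
      rw [hl, List.map_map]
      have : (Prod.fst ∘ Prod.swap : Int × String → String) = Prod.snd := rfl
      rw [this, he, PySem.List.map_snd_enumerate]
    rw [this]
    simp [PySem.Dict.keys_empty, PySem.Set.update_nil_left]
  have hgetD : ∀ owner, D.getD owner []
      = e.filterMap (fun q => if q.2 == owner then some q.1 else none) := by
    intro owner
    rw [hD, PySem.Dict.getD_foldl_modify_append, PySem.Dict.getD_empty, List.nil_append,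
      hl, filterMap_eq_filter_swap]
  rw [PySem.Dict.items_eq_map_keys D hnd [], hkeys]
  exact List.map_congr_left (fun owner _ => by rw [hgetD owner])

-- ===== VERDICT (by name: the statement is the Claim_ definition above) =====
theorem getOwners_spec : Claim_equal_getOwners := by
  intro d _ hPre
  show getOwners d = getOwners_alt d
  unfold getOwners getOwners_alt
  rw [loopA_eq_fold d (fun p hp => (hPre p hp).1), items_grouping_fold]
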